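-- pv_equiv track=rewrite | github.com/ustwan/tzr_host_api | wg_client/example/parser/dedupe_tzb.py | dedupe_tzb_content
-- ===== SOURCE A (Python) =====
-- def dedupe_tzb_content(content: str) -> str:
--     # Remove <BLOOK> and </BLOOK> tags if present
--     content = content.replace('<BLOOK>', '').replace('</BLOOK>', '')
--
--     # Find starts of <BATTLE
--     indices = []
--     start = 0
--     while True:
--         i = content.find('<BATTLE', start)
--         if i == -1:
--             break
--         indices.append(i)
--         start = i + 7
--
--     if len(indices) < 2:
--         return content
--
--     # If a second <BATTLE> exists, assume concatenated duplication; keep only until second start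
--     second = indices[1]
--     first_part = content[:second]
--
--     # Heuristic validation: if the rest begins with the first part (or its large prefix), it's duplicated
--     rest = content[second:second + len(first_part)]
--     # If not similar, still cut at second to avoid double counting
--     return first_part
-- ===== SOURCE B (Python) =====
-- def dedupe_tzb_content(content: str) -> str:
--     # Strip <BLOOK> wrapper tags, then split off at most two '<BATTLE' occurrences:
--     # fewer than 3 parts means at most one occurrence -> return unchanged;
--     # otherwise everything before the second occurrence is parts[0] + '<BATTLE' + parts[1].
--     content = content.replace('<BLOOK>', '').replace('</BLOOK>', '')
--     parts = content.split('<BATTLE', 2)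
--     if len(parts) < 3:
--         return content
--     return parts[0] + '<BATTLE' + parts[1]
-- ===== Notes on version B (the rewrite author's own statement) =====
-- stated objective: simpler
-- what changed: Replaces the explicit find-loop that collects every occurrence index of the battle tag (then cuts at the second) with a single maxsplit-2 split whose first two parts reconstruct the prefix before the second occurrence; no index list, no loop, and the dead heuristic-validation slice is gone.
import Mathlib
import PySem

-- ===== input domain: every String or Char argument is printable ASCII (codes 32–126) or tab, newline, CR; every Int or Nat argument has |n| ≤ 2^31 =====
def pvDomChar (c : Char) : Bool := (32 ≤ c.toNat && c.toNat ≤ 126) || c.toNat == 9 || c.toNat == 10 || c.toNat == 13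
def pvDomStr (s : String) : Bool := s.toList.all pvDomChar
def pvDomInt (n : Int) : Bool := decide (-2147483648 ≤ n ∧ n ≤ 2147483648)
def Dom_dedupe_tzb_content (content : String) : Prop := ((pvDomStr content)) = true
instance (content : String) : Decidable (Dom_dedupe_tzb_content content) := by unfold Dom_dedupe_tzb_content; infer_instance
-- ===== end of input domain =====

-- B replaces A's explicit find-loop (collecting every '<BATTLE' index, then cutting at the
-- second) by a single split('<BATTLE', 2) whose first two parts reconstruct the same prefix.

-- ===== PORT A =====

-- bound cited by the while-loop's termination: a successful find is ≥ start, and start ≤ len(s)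
theorem pv_findFrom_bounds (s sub : List Char) (k : Nat)
    (h : PySem.Chars.findFrom s sub (k : Int) none ≠ -1) :
    (k : Int) ≤ PySem.Chars.findFrom s sub (k : Int) none ∧ k ≤ s.length := by
  simp only [PySem.Chars.findFrom] at h ⊢
  have hk : ¬ ((k : Int) < 0) := by omega
  simp only [if_neg hk] at h ⊢
  split_ifs at h ⊢ with h1 h2
  · omega
  · simp_all
  · have := PySem.Chars.neg_one_le_find (List.drop (Int.toNat ↑k) (List.take (Int.toNat ↑s.length) s)) sub
    exact ⟨by omega, by omega⟩

-- A's "while True: i = content.find('<BATTLE', start); if i == -1: break; indices.append(i); start = i + 7"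
def battleIdxLoop (content : String) (start : Nat) (indices : List Int) : List Int :=
  let i := PySem.Str.findFrom content "<BATTLE" (start : Int)
  if i = -1 then indices
  else battleIdxLoop content (i.toNat + 7) (indices ++ [i])
termination_by content.toList.length + 7 - start
decreasing_by
  have hb := pv_findFrom_bounds content.toList "<BATTLE".toList start
    (by simpa [PySem.Str.findFrom_eq] using (by assumption : ¬ i = -1))
  have : (start : Int) ≤ i := by simpa [i, PySem.Str.findFrom_eq] using hb.1
  omega

def dedupe_tzb_content (content : String) : String :=
  let content := PySem.Str.replace (PySem.Str.replace content "<BLOOK>" "") "</BLOOK>" ""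
  let indices := battleIdxLoop content 0 []
  if indices.length < 2 then content
  else
    let second := indices[1]!
    let first_part := PySem.Str.slice content none (some second)
    let _rest := PySem.Str.slice content (some second) (some (second + (PySem.Str.len first_part : Int)))
    first_part

-- ===== PORT B =====
def dedupe_tzb_content_alt (content : String) : String :=
  let content := PySem.Str.replace (PySem.Str.replace content "<BLOOK>" "") "</BLOOK>" ""
  match PySem.Str.splitMax? content "<BATTLE" 2 with
  | some (p0 :: p1 :: _ :: _) => p0 ++ "<BATTLE" ++ p1
  | _ => content

-- ===== PRECONDITION & SPEC =====
def Spec_dedupe_tzb_content (content : String) (out : String) : Prop := out = dedupe_tzb_content_alt content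
instance (content : String) (out : String) : Decidable (Spec_dedupe_tzb_content content out) := by unfold Spec_dedupe_tzb_content; infer_instance

-- ===== CLAIM (what is proved, stated in full; the proofs are below) =====
def Claim_equal_dedupe_tzb_content : Prop := ∀ (content : String), Dom_dedupe_tzb_content content → Spec_dedupe_tzb_content content (dedupe_tzb_content content)

-- ===== LEMMAS AND PROOFS =====

-- prepend pre to the head of a partition (a split result is never empty)
def pvConsHd (pre : List Char) : List (List Char) → List (List Char)
  | [] => [pre]
  | x :: xs => (pre ++ x) :: xs

-- clean recurrence for Python's s.split(sep, m): cut at the first find, recurse with m-1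
def pvSplitRec (s sep : List Char) : Nat → List (List Char)
  | 0 => [s]
  | m + 1 =>
      let f := PySem.Chars.find s sep
      if f = -1 then [s]
      else s.take f.toNat :: pvSplitRec (s.drop (f.toNat + sep.length)) sep m

theorem pv_find_nil (sep : List Char) (h : sep ≠ []) : PySem.Chars.find [] sep = -1 := by
  rw [PySem.Chars.find_eq_neg_one_iff]; simp [h]

theorem pv_find_prefix_zero (s sep : List Char) (hp : sep.isPrefixOf s) :
    PySem.Chars.find s sep = 0 := by
  have hp' : sep <+: s := (PySem.Chars.startswith_iff s sep).mp hp
  have hn : 0 ≤ PySem.Chars.find s sep := (PySem.Chars.find_nonneg_iff s sep).mpr hp'.isInfix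
  have hs := PySem.Chars.find_spec hn
  by_contra hne
  exact hs.2 0 (by omega) (by simpa using hp')

theorem pv_find_cons (c : Char) (t sep : List Char) (hp : ¬ sep.isPrefixOf (c :: t)) :
    PySem.Chars.find (c :: t) sep =
      if PySem.Chars.find t sep = -1 then -1 else 1 + PySem.Chars.find t sep := by
  have hp0 : ¬ sep <+: (c :: t) := fun hx => hp ((PySem.Chars.startswith_iff _ _).mpr hx)
  by_cases h1 : PySem.Chars.find t sep = -1
  · have hnt : ¬ sep <:+: t := (PySem.Chars.find_eq_neg_one_iff t sep).mp h1
    have : ¬ sep <:+: (c :: t) := by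
      rw [List.infix_cons_iff]; push_neg; exact ⟨hp0, hnt⟩
    simp [h1, (PySem.Chars.find_eq_neg_one_iff _ _).mpr this]
  · rw [if_neg h1]
    have hf0 : 0 ≤ PySem.Chars.find t sep := by
      have := PySem.Chars.neg_one_le_find t sep; omega
    have hs := PySem.Chars.find_spec hf0
    have hin : sep <:+: (c :: t) :=
      List.infix_cons_iff.mpr (Or.inr ((PySem.Chars.find_nonneg_iff t sep).mp hf0))
    have hg0 : 0 ≤ PySem.Chars.find (c :: t) sep := (PySem.Chars.find_nonneg_iff _ _).mpr hin
    have hgs := PySem.Chars.find_spec hg0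
    set g := PySem.Chars.find (c :: t) sep with hgdef
    set f := PySem.Chars.find t sep with hfdef
    have hgz : g.toNat ≠ 0 := by
      intro hz
      exact hp0 (by simpa [hz] using hgs.1)
    have hj : g.toNat = f.toNat + 1 := by
      rcases Nat.exists_eq_succ_of_ne_zero hgz with ⟨j, hjj⟩
      have hle : ¬ j < f.toNat := by
        intro hlt
        exact hs.2 j hlt (by simpa [hjj, List.drop_succ_cons] using hgs.1)
      have hge : ¬ f.toNat < j := by
        intro hlt
        exact hgs.2 (f.toNat + 1) (by omega) (by simpa [List.drop_succ_cons] using hs.1)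
      omega
    omega

theorem pv_splitRec_cons (c : Char) (t sep : List Char)
    (hp : ¬ sep.isPrefixOf (c :: t)) (m : Nat) :
    pvSplitRec (c :: t) sep m = pvConsHd [c] (pvSplitRec t sep m) := by
  cases m with
  | zero => simp [pvSplitRec, pvConsHd]
  | succ m =>
    simp only [pvSplitRec, pv_find_cons c t sep hp]
    by_cases h1 : PySem.Chars.find t sep = -1
    · simp [h1, pvConsHd]
    · have hf0 : 0 ≤ PySem.Chars.find t sep := by
        have := PySem.Chars.neg_one_le_find t sep; omega
      have hne : ¬ (1 + PySem.Chars.find t sep = -1) := by omega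
      have ht : (1 + PySem.Chars.find t sep).toNat = (PySem.Chars.find t sep).toNat + 1 := by omega
      simp only [if_neg h1, if_neg hne, ht, List.take_succ_cons]
      have harith : (PySem.Chars.find t sep).toNat + 1 + sep.length
          = ((PySem.Chars.find t sep).toNat + sep.length) + 1 := by omega
      simp [harith, List.drop_succ_cons, pvConsHd]

theorem pvSplitRec_ne_nil (s sep : List Char) (m : Nat) : pvSplitRec s sep m ≠ [] := by
  cases m <;> simp [pvSplitRec] <;> split <;> simp

theorem pvConsHd_nil (l : List (List Char)) (h : l ≠ []) : pvConsHd [] l = l := by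
  cases l <;> simp_all [pvConsHd]

theorem pvConsHd_consHd (a b : List Char) (l : List (List Char)) :
    pvConsHd a (pvConsHd b l) = pvConsHd (a ++ b) l := by
  cases l <;> simp [pvConsHd]

theorem pv_go_eq (sep : List Char) (h : sep ≠ []) :
    ∀ (fuel : Nat) (s : List Char), s.length ≤ fuel → ∀ (m : Nat) (cur : List Char) (acc : List (List Char)),
      PySem.Chars.splitOnMax.go sep fuel m s cur acc =
        acc.reverse ++ pvConsHd cur.reverse (pvSplitRec s sep m) := by
  intro fuel
  induction fuel with
  | zero =>
    intro s hs m cur acc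
    have : s = [] := by cases s <;> simp_all
    subst this
    cases m with
    | zero => simp [PySem.Chars.splitOnMax.go, pvSplitRec, pvConsHd]
    | succ m => simp [PySem.Chars.splitOnMax.go, pvSplitRec, pv_find_nil sep h, pvConsHd]
  | succ fuel ih =>
    intro s hs m cur acc
    cases s with
    | nil =>
      cases m with
      | zero => simp [PySem.Chars.splitOnMax.go, pvSplitRec, pvConsHd]
      | succ m => simp [PySem.Chars.splitOnMax.go, pvSplitRec, pv_find_nil sep h, pvConsHd]
    | cons c t =>
      rw [PySem.Chars.splitOnMax.go.eq_def]
      dsimp only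
      by_cases hm : m = 0
      · subst hm
        simp [pvSplitRec, pvConsHd]
      · rw [if_neg hm]
        by_cases hpre : sep.isPrefixOf (c :: t)
        · rw [if_pos hpre]
          obtain ⟨m', rfl⟩ : ∃ m', m = m' + 1 := ⟨m - 1, by omega⟩
          have hlen : (List.drop sep.length (c :: t)).length ≤ fuel := by
            have : 1 ≤ sep.length := by cases sep <;> simp_all
            simp at hs ⊢
            omega
          rw [ih _ hlen (m' + 1 - 1) [] (cur.reverse :: acc)]
          have hf0 : PySem.Chars.find (c :: t) sep = 0 := pv_find_prefix_zero _ _ hpre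
          simp only [pvSplitRec, hf0]
          norm_num
          rw [pvConsHd_nil _ (pvSplitRec_ne_nil _ _ _)]
          simp [pvConsHd]
        · rw [if_neg hpre]
          have hlen : t.length ≤ fuel := by simp at hs; omega
          rw [ih t hlen m (c :: cur) acc]
          rw [pv_splitRec_cons c t sep hpre m, pvConsHd_consHd]
          simp

theorem pv_splitOnMax_two (s sep : List Char) (h : sep ≠ []) :
    PySem.Chars.splitOnMax s sep 2 = pvSplitRec s sep 2 := by
  rw [PySem.Chars.splitOnMax]
  rw [if_neg (by omega : ¬ ((2:Int) < 0))]
  rw [show Int.toNat 2 = 2 from rfl]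
  rw [pv_go_eq sep h (s.length + 1) s (by omega) 2 [] []]
  simp [pvConsHd_nil _ (pvSplitRec_ne_nil s sep 2)]

theorem pv_loop_append (c : String) (start : Nat) :
    ∀ idxs, battleIdxLoop c start idxs = idxs ++ battleIdxLoop c start [] := by
  generalize hm : c.toList.length + 7 - start = n
  induction n using Nat.strong_induction_on generalizing start with
  | _ n ih =>
    intro idxs
    rw [battleIdxLoop, battleIdxLoop.eq_def (indices := [])]
    simp only
    by_cases hi : PySem.Str.findFrom c "<BATTLE" (start : Int) = -1
    · rw [if_pos hi, if_pos hi]; simp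
    · rw [if_neg hi, if_neg hi]
      simp only [List.nil_append]
      have hb := pv_findFrom_bounds c.toList "<BATTLE".toList start
        (by simpa [PySem.Str.findFrom_eq] using hi)
      have hst : (start : Int) ≤ PySem.Str.findFrom c "<BATTLE" (start : Int) := by
        simpa [PySem.Str.findFrom_eq] using hb.1
      set i := PySem.Str.findFrom c "<BATTLE" (start : Int) with hidef
      have hlt : c.toList.length + 7 - (i.toNat + 7) < n := by omega
      rw [ih _ hlt (i.toNat + 7) rfl (idxs ++ [i]), ih _ hlt (i.toNat + 7) rfl [i]]
      simp

-- ===== VERDICT (by name: the statement is the Claim_ definition above) =====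
theorem dedupe_tzb_content_spec : Claim_equal_dedupe_tzb_content := by
  intro content _
  unfold Spec_dedupe_tzb_content
  simp only [dedupe_tzb_content, dedupe_tzb_content_alt]
  set c := PySem.Str.replace (PySem.Str.replace content "<BLOOK>" "") "</BLOOK>" "" with hc
  have hsub : ("<BATTLE".toList : List Char) ≠ [] := by decide
  have hsplit : PySem.Str.splitMax? c "<BATTLE" 2
      = some ((pvSplitRec c.toList "<BATTLE".toList 2).map String.ofList) := by
    rw [PySem.Str.splitMax?.eq_1, PySem.Chars.splitMax?.eq_1]
    rw [if_neg (by decide : ¬ (("<BATTLE".toList : List Char).isEmpty = true))]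
    rw [pv_splitOnMax_two _ _ hsub]
    rfl
  set f1 := PySem.Chars.find c.toList "<BATTLE".toList with hf1def
  have hi0 : PySem.Str.findFrom c "<BATTLE" ((0:Nat):Int) = f1 := by
    rw [PySem.Str.findFrom_eq, show ((0:Nat):Int) = 0 from rfl, PySem.Chars.findFrom_zero, hf1def]
  by_cases hf1 : f1 = -1
  · have hloop : battleIdxLoop c 0 [] = [] := by
      rw [battleIdxLoop]
      simp only [hi0]
      rw [if_pos hf1]
    have hrec : pvSplitRec c.toList "<BATTLE".toList 2 = [c.toList] := by
      rw [show (2:Nat) = 1+1 from rfl, pvSplitRec]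
      simp only [← hf1def, if_pos hf1]
    rw [hloop, hsplit, hrec]
    simp
  · have hf1n : 0 ≤ f1 := by
      have := PySem.Chars.neg_one_le_find c.toList "<BATTLE".toList
      omega
    have hsp := PySem.Chars.find_spec (s := c.toList) (sub := "<BATTLE".toList) (by rw [← hf1def]; exact hf1n)
    have hp1 : "<BATTLE".toList <+: c.toList.drop f1.toNat := by
      rw [hf1def]; exact hsp.1
    have hlen7 : f1.toNat + 7 ≤ c.toList.length := by
      have hle := hp1.length_le
      simp only [List.length_drop] at hle
      have h7 : ("<BATTLE".toList : List Char).length = 7 := by decide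
      omega
    set t := c.toList.drop (f1.toNat + 7) with htdef
    set f2 := PySem.Chars.find t "<BATTLE".toList with hf2def
    have hiK : PySem.Str.findFrom c "<BATTLE" ((f1.toNat + 7 : Nat) : Int)
        = if f2 = -1 then -1 else ((f1.toNat + 7 : Nat) : Int) + f2 := by
      rw [PySem.Str.findFrom_eq]
      have h := PySem.Chars.findFrom_natCast c.toList "<BATTLE".toList (f1.toNat + 7) hlen7
      rw [← htdef, ← hf2def] at h
      exact h
    have hloop1 : battleIdxLoop c 0 [] = [f1] ++ battleIdxLoop c (f1.toNat + 7) [] := by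
      rw [battleIdxLoop]
      simp only [hi0]
      rw [if_neg hf1]
      rw [pv_loop_append]
      simp only [List.nil_append]
    have hrec2 : pvSplitRec c.toList "<BATTLE".toList 2
        = c.toList.take f1.toNat :: pvSplitRec t "<BATTLE".toList 1 := by
      rw [show (2:Nat) = 1+1 from rfl, pvSplitRec]
      simp only [← hf1def, if_neg hf1]
      rw [htdef]
      norm_num
      rfl
    by_cases hf2 : f2 = -1
    · have hloop2 : battleIdxLoop c (f1.toNat + 7) [] = [] := by
        rw [battleIdxLoop]
        simp only [hiK]
        simp [hf2]
      have hrec1 : pvSplitRec t "<BATTLE".toList 1 = [t] := by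
        rw [show (1:Nat) = 0+1 from rfl, pvSplitRec]
        simp only [← hf2def, if_pos hf2]
      rw [hloop1, hloop2, hsplit, hrec2, hrec1]
      simp
    · have hf2n : 0 ≤ f2 := by
        have := PySem.Chars.neg_one_le_find t "<BATTLE".toList
        omega
      have hloop2 : battleIdxLoop c (f1.toNat + 7) []
          = [((f1.toNat + 7 : Nat) : Int) + f2] ++ battleIdxLoop c ((((f1.toNat + 7 : Nat) : Int) + f2).toNat + 7) [] := by
        rw [battleIdxLoop]
        simp only [hiK]
        rw [if_neg (by omega)]
        rw [if_neg hf2]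
        rw [pv_loop_append]
        simp only [List.nil_append]
      have hrec1 : pvSplitRec t "<BATTLE".toList 1
          = t.take f2.toNat :: [t.drop (f2.toNat + 7)] := by
        rw [show (1:Nat) = 0+1 from rfl, pvSplitRec]
        simp only [← hf2def, if_neg hf2]
        norm_num [pvSplitRec]
        rfl
      rw [hloop1, hloop2, hsplit, hrec2, hrec1]
      set i2 : Int := ((f1.toNat + 7 : Nat) : Int) + f2 with hi2def
      have hlen2 : ¬ (([f1] ++ ([i2] ++ battleIdxLoop c (i2.toNat + 7) [])).length < 2) := by
        simp
      rw [if_neg hlen2]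
      have hsecond : ([f1] ++ ([i2] ++ battleIdxLoop c (i2.toNat + 7) []))[1]! = i2 := by
        simp
      rw [hsecond]
      apply String.toList_inj.mp
      have hslice : (PySem.Str.slice c none (some i2)).toList = c.toList.take i2.toNat := by
        rw [PySem.Str.toList_slice, PySem.Chars.slice_eq_listSlice, PySem.List.slice_to _ (by omega : (0:Int) ≤ i2)]
      have h7take : (c.toList.drop f1.toNat).take 7 = "<BATTLE".toList := by
        have := List.prefix_iff_eq_take.mp hp1
        exact this.symm
      have hi2toNat : i2.toNat = (f1.toNat + 7) + f2.toNat := by omega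
      rw [hslice, hi2toNat]
      rw [List.take_add, List.take_add]
      simp only [← htdef, h7take]
      simp
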